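-- pv_equiv track=rewrite | github.com/edoriggio/algorithms-and-data-structures | exercises/good_are_adjacent.py | good_are_adjacent
-- ===== SOURCE A (Python) =====
-- def is_good(x):
--     return x % 2 == 0
--
-- def good_are_adjacent(A):
--     adjacent = False
--     not_good = False
--
--     for i in range(len(A)):
--         if is_good(A[i]):
--             adjacent = True
--         elif not is_good(A[i]) and adjacent:
--             not_good = True
--
--         if adjacent and not_good and is_good(A[i]):
--             return False
--
--     return adjacent
-- ===== SOURCE B (Python) =====
-- def is_good(x):
--     return x % 2 == 0
--
-- def good_are_adjacent(A):
--     idxs = [i for i, x in enumerate(A) if is_good(x)]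
--     if not idxs:
--         return False
--     return idxs[-1] - idxs[0] + 1 == len(idxs)
-- ===== Notes on version B (the rewrite author's own statement) =====
-- stated objective: simpler
-- what changed: Replaces A's two-flag single-pass state machine with early return by a gather of even-element indices followed by an arithmetic span check (last - first + 1 == count).
import Mathlib
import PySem

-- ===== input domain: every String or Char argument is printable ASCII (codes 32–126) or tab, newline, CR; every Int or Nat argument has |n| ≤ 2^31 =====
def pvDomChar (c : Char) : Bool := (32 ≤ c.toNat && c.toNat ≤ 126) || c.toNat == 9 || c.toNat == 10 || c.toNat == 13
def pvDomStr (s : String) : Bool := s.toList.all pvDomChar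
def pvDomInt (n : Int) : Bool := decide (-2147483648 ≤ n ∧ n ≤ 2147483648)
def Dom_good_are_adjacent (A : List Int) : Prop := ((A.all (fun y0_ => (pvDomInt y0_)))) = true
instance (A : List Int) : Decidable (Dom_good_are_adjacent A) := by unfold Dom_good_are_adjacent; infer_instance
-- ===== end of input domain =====

-- B replaces A's two-flag state machine by gathering the even-element indices and an arithmetic span check; objective: simpler.

-- ===== PORT A =====
def is_good (x : Int) : Bool := PySem.Int.mod x 2 == 0

-- A's for-loop over range(len(A)) reading A[i], carried state (adjacent, not_good), early `return False`
def goLoop : List Int → Bool → Bool → Bool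
  | [], adjacent, _notGood => adjacent
  | x :: xs, adjacent, notGood =>
    let adjacent' := if is_good x then true else adjacent
    let notGood' := if !(is_good x) && adjacent then true else notGood
    if adjacent' && notGood' && is_good x then false
    else goLoop xs adjacent' notGood'

def good_are_adjacent (A : List Int) : Bool := goLoop A false false

-- ===== PORT B =====
def good_are_adjacent_alt (A : List Int) : Bool :=
  let idxs : List Int :=
    ((PySem.List.enumerate A 0).filter (fun p => is_good p.2)).map Prod.fst
  match idxs with
  | [] => false
  | i :: rest => decide ((i :: rest).getLastD 0 - i + 1 = ((i :: rest).length : Int))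

-- ===== PRECONDITION & SPEC =====
def Spec_good_are_adjacent (A : List Int) (out : Bool) : Prop := out = good_are_adjacent_alt A
instance (A : List Int) (out : Bool) : Decidable (Spec_good_are_adjacent A out) := by unfold Spec_good_are_adjacent; infer_instance

-- ===== CLAIM (what is proved, stated in full; the proofs are below) =====
def Claim_equal_good_are_adjacent : Prop := ∀ (A : List Int), Dom_good_are_adjacent A → Spec_good_are_adjacent A (good_are_adjacent A)

-- ===== LEMMAS AND PROOFS =====

-- the common specification both ports are reduced to:
-- "some element is even, and after dropping the leading odds and then the run of evens, only odds remain"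
def contigSpec (xs : List Int) : Bool :=
  (!(xs.all (fun y => !is_good y))) &&
    ((xs.dropWhile (fun y => !is_good y)).dropWhile is_good).all (fun y => !is_good y)

-- B's even-index list, generalised to an arbitrary start offset
def evIdx (s : Int) (xs : List Int) : List Int :=
  ((PySem.List.enumerate xs s).filter (fun p => is_good p.2)).map Prod.fst

-- B generalised to an arbitrary start offset
def altAt (s : Int) (xs : List Int) : Bool :=
  match evIdx s xs with
  | [] => false
  | i :: rest => decide ((i :: rest).getLastD 0 - i + 1 = ((i :: rest).length : Int))

theorem decide_eq_bool {p : Prop} [Decidable p] {b : Bool} (h : p ↔ b = true) : decide p = b := by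
  cases b <;> simp_all

theorem evIdx_cons (s x : Int) (xs : List Int) :
    evIdx s (x :: xs) = if is_good x then s :: evIdx (s + 1) xs else evIdx (s + 1) xs := by
  simp only [evIdx, PySem.List.enumerate_cons, List.filter_cons]
  split_ifs <;> simp_all

theorem evIdx_nil_iff (xs : List Int) : ∀ s : Int,
    (evIdx s xs = [] ↔ xs.all (fun y => !is_good y) = true) := by
  induction xs with
  | nil => intro s; simp [evIdx]
  | cons x xs ih =>
    intro s
    rw [evIdx_cons]
    split_ifs with h <;> simp [h, ih (s + 1)]

theorem getLastD_of_ne_nil {L : List Int} (h : L ≠ []) (d d' : Int) :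
    L.getLastD d = L.getLastD d' := by
  cases L with
  | nil => exact absurd rfl h
  | cons a l => rw [List.getLastD_cons, List.getLastD_cons]

theorem lastD_ge (xs : List Int) : ∀ s : Int,
    s + ((evIdx s xs).length : Int) - 1 ≤ (evIdx s xs).getLastD (s - 1) := by
  induction xs with
  | nil => intro s; simp [evIdx]
  | cons x xs ih =>
    intro s
    have ih' := ih (s + 1)
    rw [show s + 1 - 1 = s from by omega] at ih'
    rw [evIdx_cons]
    split_ifs with h
    · rw [List.getLastD_cons]
      simp only [List.length_cons]
      push_cast
      omega
    · cases hE : evIdx (s + 1) xs with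
      | nil => simp
      | cons i r =>
        rw [hE] at ih'
        rw [getLastD_of_ne_nil (List.cons_ne_nil i r) (s - 1) s]
        omega

-- the even indices of xs (starting at s) end at s + count - 1 iff the evens of xs form a prefix of xs
theorem even_prefix_char (xs : List Int) : ∀ s : Int,
    ((evIdx s xs).getLastD (s - 1) = s + ((evIdx s xs).length : Int) - 1)
      ↔ ((xs.dropWhile is_good).all (fun y => !is_good y) = true) := by
  induction xs with
  | nil => intro s; simp [evIdx]
  | cons x xs ih =>
    intro s
    have ih' := ih (s + 1)
    rw [show s + 1 - 1 = s from by omega] at ih'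
    rw [evIdx_cons, List.dropWhile_cons]
    split_ifs with h
    · rw [List.getLastD_cons, ← ih']
      simp only [List.length_cons]
      constructor <;> intro hc <;> (push_cast at hc ⊢; omega)
    · cases hE : evIdx (s + 1) xs with
      | nil =>
        have hall : xs.all (fun y => !is_good y) = true := (evIdx_nil_iff xs (s + 1)).mp hE
        simp [hall, h]
      | cons i r =>
        have hb := lastD_ge xs (s + 1)
        rw [show s + 1 - 1 = s from by omega, hE] at hb
        have hnall : ¬ (xs.all (fun y => !is_good y) = true) := by
          intro hall
          have := (evIdx_nil_iff xs (s + 1)).mpr hall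
          rw [hE] at this
          exact absurd this (List.cons_ne_nil i r)
        rw [getLastD_of_ne_nil (List.cons_ne_nil i r) (s - 1) s]
        simp only [List.all_cons, h, Bool.not_false, Bool.true_and]
        constructor
        · intro hc; exact absurd hc (by omega)
        · intro hc; exact absurd hc hnall

theorem altAt_char (xs : List Int) : ∀ s : Int, altAt s xs = contigSpec xs := by
  induction xs with
  | nil => intro s; rfl
  | cons x xs ih =>
    intro s
    unfold altAt contigSpec
    rw [evIdx_cons]
    split_ifs with h
    · -- head even: idxs = s :: evIdx (s+1) xs; span check ⇔ evens of xs form a prefix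
      have hc := even_prefix_char xs (s + 1)
      rw [show s + 1 - 1 = s from by omega] at hc
      simp only [List.all_cons, h, Bool.not_true, Bool.false_and, Bool.not_false, Bool.true_and,
        List.dropWhile_cons, Bool.false_eq_true, if_false, if_true]
      apply decide_eq_bool
      rw [List.getLastD_cons, ← hc]
      simp only [List.length_cons]
      cases hE : evIdx (s + 1) xs with
      | nil => simp
      | cons i r => constructor <;> intro h2 <;> (push_cast at h2 ⊢; omega)
    · -- head odd: idxs and the spec are those of xs
      have ih' := ih (s + 1)
      unfold altAt contigSpec at ih'
      rw [ih']
      simp [h]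

theorem loop_tt_tt (xs : List Int) : goLoop xs true true = xs.all (fun y => !is_good y) := by
  induction xs with
  | nil => rfl
  | cons x xs ih => by_cases h : is_good x = true <;> simp [goLoop, h, ih]

theorem loop_tt_ff (xs : List Int) :
    goLoop xs true false = (xs.dropWhile is_good).all (fun y => !is_good y) := by
  induction xs with
  | nil => rfl
  | cons x xs ih =>
    by_cases h : is_good x = true <;>
      simp [goLoop, h, ih, loop_tt_tt]

theorem loop_ff_ff (xs : List Int) : goLoop xs false false = contigSpec xs := by
  induction xs with
  | nil => rfl
  | cons x xs ih =>
    unfold contigSpec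
    by_cases h : is_good x = true
    · simp [goLoop, h, loop_tt_ff]
    · unfold contigSpec at ih
      simp only [Bool.not_eq_true] at h
      simp [goLoop, h, ih]

theorem alt_eq_altAt (A : List Int) : good_are_adjacent_alt A = altAt 0 A := rfl

-- ===== VERDICT (by name: the statement is the Claim_ definition above) =====
theorem good_are_adjacent_spec : Claim_equal_good_are_adjacent := by
  intro A _
  unfold Spec_good_are_adjacent good_are_adjacent
  rw [loop_ff_ff, alt_eq_altAt, altAt_char]
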